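-- pv_equiv track=rewrite | github.com/teljoa/programacion | python/Tema2/Modular Programming II/boletin/boletin/ejercicio6.py | getNumberOfDigitsDecimal
-- ===== SOURCE A (Python) =====
-- def getNumberOfDigitsDecimal(cad):
--     cad = str(cad)
--     k=0
--     decimal = False
--     for n in range(len(cad)):
--         if cad[n].isnumeric():
--             k +=1
--         elif cad[n] == '.' and not decimal and (n != (len(cad)-1)) and (n != 0):
--             if (n == 1 and (cad [0] in '+-')):
--                 return None
--             else:
--                 decimal = True
--         elif (cad[n] == '+' or cad[n] == '-') and n == 0:
--             pass
--         else:
--             return None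
--     return k
-- ===== SOURCE B (Python) =====
-- def getNumberOfDigitsDecimal(cad):
--     s = str(cad)
--     sign = 1 if s[:1] in ('+', '-') else 0
--     body = s[sign:]
--     if '.' in body:
--         i = body.index('.')
--         if i == 0 or sign + i == len(s) - 1:
--             return None
--         segs = [body[:i], body[i + 1:]]
--     else:
--         segs = [body]
--     k = 0
--     for seg in segs:
--         for ch in seg:
--             if not ch.isnumeric():
--                 return None
--             k += 1
--     return k
-- ===== Notes on version B (the rewrite author's own statement) =====
-- stated objective: simpler
-- what changed: Replaces A's single stateful index loop (decimal flag, positional checks inside the scan) by a split-first decomposition: strip the optional sign, locate the single dot, reject bad dot positions up front, then just count digit characters in the one or two segments.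
import Mathlib
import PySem

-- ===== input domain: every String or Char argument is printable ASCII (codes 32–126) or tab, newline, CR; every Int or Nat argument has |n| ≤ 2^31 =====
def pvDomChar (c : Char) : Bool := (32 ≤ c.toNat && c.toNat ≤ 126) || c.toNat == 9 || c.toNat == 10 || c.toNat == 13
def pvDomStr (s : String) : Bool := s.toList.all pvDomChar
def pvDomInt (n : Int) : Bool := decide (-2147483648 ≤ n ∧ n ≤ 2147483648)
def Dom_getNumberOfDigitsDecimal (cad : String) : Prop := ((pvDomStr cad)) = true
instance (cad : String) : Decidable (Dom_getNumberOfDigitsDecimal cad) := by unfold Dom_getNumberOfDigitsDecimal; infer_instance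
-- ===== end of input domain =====

-- B replaces A's single stateful index loop by a split-first decomposition (sign, dot-position checks up front, then plain digit counting of the segments); objective: simpler.

-- ===== PORT A =====
-- the for-n-in-range loop of A: state k (count) and dec (the 'decimal' flag), n the index.
-- 'isnumeric()' is ported as Char.isDigit, exact on the ASCII domain (Dom) where isnumeric = isdigit.
-- c0 is cad[0] (read only when n = 1, where the string is nonempty, so the headD default is never consulted).
def pvLoopA (c0 : Char) (len : Nat) : Nat → List Char → Int → Bool → Option Int
  | _, [], k, _ => some k
  | n, c :: rest, k, dec =>
    if c.isDigit then pvLoopA c0 len (n+1) rest (k+1) dec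
    else if c = '.' ∧ dec = false ∧ n ≠ len - 1 ∧ n ≠ 0 then
      (if n = 1 ∧ (c0 = '+' ∨ c0 = '-') then none
       else pvLoopA c0 len (n+1) rest k true)
    else if (c = '+' ∨ c = '-') ∧ n = 0 then pvLoopA c0 len (n+1) rest k dec
    else none

def getNumberOfDigitsDecimal (cad : String) : Option Int :=
  pvLoopA (cad.toList.headD ' ') cad.toList.length 0 cad.toList 0 false

-- ===== PORT B =====
-- 'for ch in seg' inner loop: count digits, None on a non-digit ('isnumeric' = isDigit on ASCII).
def pvCountSeg : List Char → Int → Option Int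
  | [], k => some k
  | c :: rest, k => if c.isDigit then pvCountSeg rest (k+1) else none

-- 'for seg in segs' outer loop.
def pvCountSegs : List (List Char) → Int → Option Int
  | [], k => some k
  | seg :: rest, k =>
    match pvCountSeg seg k with
    | none => none
    | some k' => pvCountSegs rest k'

-- sign = 1 if s[:1] in ('+','-') else 0
def pvSign : List Char → Nat
  | c :: _ => if c = '+' ∨ c = '-' then 1 else 0
  | [] => 0

-- body of Source B on the code points; body = cs[sign:], i = body.index('.')
def pvAlt (cs : List Char) : Option Int :=
  if '.' ∈ cs.drop (pvSign cs) then
    if (cs.drop (pvSign cs)).idxOf '.' = 0 ∨ pvSign cs + (cs.drop (pvSign cs)).idxOf '.' = cs.length - 1 then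
      none
    else
      pvCountSegs [(cs.drop (pvSign cs)).take ((cs.drop (pvSign cs)).idxOf '.'),
                   (cs.drop (pvSign cs)).drop ((cs.drop (pvSign cs)).idxOf '.' + 1)] 0
  else pvCountSegs [cs.drop (pvSign cs)] 0

def getNumberOfDigitsDecimal_alt (cad : String) : Option Int := pvAlt cad.toList

-- ===== PRECONDITION & SPEC =====
def Spec_getNumberOfDigitsDecimal (cad : String) (out : Option Int) : Prop := out = getNumberOfDigitsDecimal_alt cad
instance (cad : String) (out : Option Int) : Decidable (Spec_getNumberOfDigitsDecimal cad out) := by unfold Spec_getNumberOfDigitsDecimal; infer_instance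

-- ===== CLAIM (what is proved, stated in full; the proofs are below) =====
def Claim_equal_getNumberOfDigitsDecimal : Prop := ∀ (cad : String), Dom_getNumberOfDigitsDecimal cad → Spec_getNumberOfDigitsDecimal cad (getNumberOfDigitsDecimal cad)

-- ===== LEMMAS AND PROOFS =====

-- What B computes on the not-yet-scanned suffix 'rest' of the body, seen from A's index n (s = sign width).
def pvScanSpec (len s n : Nat) (rest : List Char) (k : Int) : Option Int :=
  if '.' ∈ rest then
    if n + rest.idxOf '.' = s ∨ n + rest.idxOf '.' = len - 1 then none
    else pvCountSegs [rest.take (rest.idxOf '.'), rest.drop (rest.idxOf '.' + 1)] k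
  else pvCountSegs [rest] k

theorem pvCountSegs_singleton (seg : List Char) (k : Int) :
    pvCountSegs [seg] k = pvCountSeg seg k := by
  cases h : pvCountSeg seg k <;> simp [pvCountSegs, h]

theorem pvScanSpec_digit (len s n : Nat) (c : Char) (r : List Char) (k : Int)
    (hd : c.isDigit = true) : pvScanSpec len s n (c :: r) k = pvScanSpec len s (n+1) r (k+1) := by
  have hne : c ≠ '.' := by intro h; subst h; simp at hd
  have hbe : (c == '.') = false := by simp [hne]
  unfold pvScanSpec
  by_cases hm : '.' ∈ r
  · have hm' : '.' ∈ c :: r := List.mem_cons_of_mem _ hm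
    have hidx : (c :: r).idxOf '.' = r.idxOf '.' + 1 := by simp [List.idxOf_cons, hbe]
    rw [if_pos hm', if_pos hm, hidx]
    have hiff : (n + (r.idxOf '.' + 1) = s ∨ n + (r.idxOf '.' + 1) = len - 1)
        ↔ (n + 1 + r.idxOf '.' = s ∨ n + 1 + r.idxOf '.' = len - 1) := by omega
    rw [if_congr hiff rfl rfl]
    split_ifs with h
    · rfl
    · simp [pvCountSegs, pvCountSeg, hd, List.take_succ_cons, List.drop_succ_cons]
  · have hm' : '.' ∉ c :: r := by
      intro h; rcases List.mem_cons.mp h with h | h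
      · exact hne h.symm
      · exact hm h
    rw [if_neg hm', if_neg hm]
    simp [pvCountSegs, pvCountSeg, hd]

-- After the dot has been consumed (dec = true) A just counts digits (None on anything else).
theorem pvLoopA_post (c0 : Char) (len : Nat) (rest : List Char) :
    ∀ n k, 1 ≤ n → pvLoopA c0 len n rest k true = pvCountSeg rest k := by
  induction rest with
  | nil => intro n k _; rfl
  | cons c r ih =>
    intro n k hn
    unfold pvLoopA pvCountSeg
    by_cases hd : c.isDigit
    · rw [if_pos hd, if_pos hd]; exact ih (n+1) (k+1) (by omega)
    · rw [if_neg hd, if_neg hd]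
      rw [if_neg (by simp), if_neg (by intro h; omega)]

-- Before the dot (dec = false), from any index n ≥ 1, A's loop computes pvScanSpec,
-- provided c0 (the head of the string) is a sign character iff s = 1.
theorem pvLoopA_pre (c0 : Char) (len s : Nat)
    (hc0 : (s = 1 ∧ (c0 = '+' ∨ c0 = '-')) ∨ (s = 0 ∧ ¬(c0 = '+' ∨ c0 = '-'))) :
    ∀ (rest : List Char) (n : Nat) (k : Int), 1 ≤ n → len = n + rest.length →
      pvLoopA c0 len n rest k false = pvScanSpec len s n rest k := by
  intro rest
  induction rest with
  | nil => intro n k _ _; simp [pvLoopA, pvScanSpec, pvCountSegs, pvCountSeg]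
  | cons c r ih =>
    intro n k hn hlen
    have hlen' : len = n + 1 + r.length := by simp at hlen; omega
    by_cases hd : c.isDigit
    · rw [pvScanSpec_digit len s n c r k hd]
      conv_lhs => rw [pvLoopA]; rw [if_pos hd]
      exact ih (n+1) (k+1) (by omega) hlen'
    · by_cases hdot : c = '.'
      · subst hdot
        have hmem : '.' ∈ ('.' :: r) := List.mem_cons_self
        have hidx : ('.' :: r).idxOf '.' = 0 := by simp [List.idxOf_cons]
        conv_lhs => rw [pvLoopA]; rw [if_neg hd]
        conv_rhs => rw [pvScanSpec]; rw [if_pos hmem, hidx]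
        by_cases hlast : n = len - 1
        · rw [if_neg (by rintro ⟨_, _, h, _⟩; exact h hlast)]
          rw [if_neg (by rintro ⟨h, _⟩; revert h; decide)]
          rw [if_pos (by omega)]
        · by_cases hns : n = s
          · have hsign : c0 = '+' ∨ c0 = '-' := by
              rcases hc0 with ⟨_, h⟩ | ⟨h0, _⟩
              · exact h
              · omega
            have hs1 : s = 1 := by
              rcases hc0 with ⟨h, _⟩ | ⟨h, _⟩ <;> omega
            rw [if_pos ⟨rfl, rfl, hlast, by omega⟩]
            rw [if_pos ⟨by omega, hsign⟩, if_pos (by omega)]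
          · have hnot1 : ¬(n = 1 ∧ (c0 = '+' ∨ c0 = '-')) := by
              rintro ⟨h1, hsg⟩
              rcases hc0 with ⟨hs, _⟩ | ⟨_, h⟩
              · exact hns (by omega)
              · exact h hsg
            rw [if_pos ⟨rfl, rfl, hlast, by omega⟩, if_neg hnot1]
            rw [if_neg (by omega)]
            rw [pvLoopA_post c0 len r (n+1) k (by omega)]
            simp only [List.take_zero, List.drop_succ_cons, List.drop_zero]
            rw [pvCountSegs, pvCountSeg]
            exact (pvCountSegs_singleton r k).symm
      · -- c is neither a digit nor '.': A returns none; every branch of pvScanSpec starts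
        -- its segment with c and returns none too.
        have hbe : (c == '.') = false := by simp [hdot]
        conv_lhs =>
          rw [pvLoopA]
          rw [if_neg hd, if_neg (by rintro ⟨h, _⟩; exact hdot h),
              if_neg (by rintro ⟨_, h0⟩; omega)]
        rw [pvScanSpec]
        by_cases hm : '.' ∈ c :: r
        · have hidx : (c :: r).idxOf '.' = r.idxOf '.' + 1 := by simp [List.idxOf_cons, hbe]
          rw [if_pos hm, hidx]
          split_ifs <;>
            first
              | rfl
              | simp [pvCountSegs, pvCountSeg, hd, List.take_succ_cons]
        · rw [if_neg hm]; simp [pvCountSegs, pvCountSeg, hd]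

-- A's whole loop equals B on the raw code-point list.
theorem pvLoopA_eq_pvAlt (cs : List Char) :
    pvLoopA (cs.headD ' ') cs.length 0 cs 0 false = pvAlt cs := by
  cases cs with
  | nil => simp [pvLoopA, pvAlt, pvSign, pvCountSegs, pvCountSeg]
  | cons c r =>
    by_cases hsign : c = '+' ∨ c = '-'
    · -- sign case: A passes over index 0, B strips the sign; both then scan r from index 1.
      have hd : c.isDigit = false := by rcases hsign with h | h <;> (subst h; decide)
      have hdot : ¬(c = '.') := by rcases hsign with h | h <;> (subst h; decide)
      simp only [List.headD_cons]
      conv_lhs =>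
        rw [pvLoopA]
        rw [if_neg (by simp [hd]), if_neg (by rintro ⟨h, _⟩; exact hdot h), if_pos ⟨hsign, rfl⟩]
      rw [pvLoopA_pre c (c :: r).length 1 (Or.inl ⟨rfl, hsign⟩) r 1 0 (by omega) (by simp; omega)]
      rw [pvAlt]
      have hs : pvSign (c :: r) = 1 := by simp [pvSign, hsign]
      rw [hs]
      simp only [List.drop_one, List.tail_cons]
      rw [pvScanSpec]
      by_cases hm : '.' ∈ r
      · rw [if_pos hm, if_pos hm]
        have hiff : (1 + r.idxOf '.' = 1 ∨ 1 + r.idxOf '.' = (c :: r).length - 1)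
            ↔ (r.idxOf '.' = 0 ∨ 1 + r.idxOf '.' = (c :: r).length - 1) := by omega
        rw [if_congr hiff rfl rfl]
      · rw [if_neg hm, if_neg hm]
    · -- no sign: B's body is the whole string; A's first step matches pvScanSpec's first step.
      have hs : pvSign (c :: r) = 0 := by simp [pvSign, hsign]
      rw [pvAlt, hs]
      simp only [List.drop_zero, List.headD_cons]
      have hB : (if '.' ∈ c :: r then
            if (c :: r).idxOf '.' = 0 ∨ 0 + (c :: r).idxOf '.' = (c :: r).length - 1 then none
            else pvCountSegs [(c :: r).take ((c :: r).idxOf '.'),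
                              (c :: r).drop ((c :: r).idxOf '.' + 1)] 0
          else pvCountSegs [c :: r] 0)
          = pvScanSpec (c :: r).length 0 0 (c :: r) 0 := by
        rw [pvScanSpec]
        by_cases hm : '.' ∈ c :: r
        · rw [if_pos hm, if_pos hm]
          have hiff : ((c :: r).idxOf '.' = 0 ∨ 0 + (c :: r).idxOf '.' = (c :: r).length - 1)
              ↔ (0 + (c :: r).idxOf '.' = 0 ∨ 0 + (c :: r).idxOf '.' = (c :: r).length - 1) := by
            omega
          rw [if_congr hiff rfl rfl]
        · rw [if_neg hm, if_neg hm]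
      rw [hB]
      by_cases hd : c.isDigit
      · rw [pvScanSpec_digit (c :: r).length 0 0 c r 0 hd]
        conv_lhs => rw [pvLoopA]; rw [if_pos hd]
        exact pvLoopA_pre c (c :: r).length 0 (Or.inr ⟨rfl, hsign⟩) r 1 1 (by omega) (by simp; omega)
      · by_cases hdot : c = '.'
        · subst hdot
          conv_lhs =>
            rw [pvLoopA]
            rw [if_neg hd, if_neg (by rintro ⟨_, _, _, h0⟩; exact h0 rfl),
                if_neg (by rintro ⟨h, _⟩; exact hsign h)]
          rw [pvScanSpec]
          have hidx : ('.' :: r).idxOf '.' = 0 := by simp [List.idxOf_cons]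
          rw [if_pos List.mem_cons_self, hidx, if_pos (by omega)]
        · have hbe : (c == '.') = false := by simp [hdot]
          conv_lhs =>
            rw [pvLoopA]
            rw [if_neg hd, if_neg (by rintro ⟨h, _⟩; exact hdot h),
                if_neg (by rintro ⟨h, _⟩; exact hsign h)]
          rw [pvScanSpec]
          by_cases hm : '.' ∈ c :: r
          · have hidx : (c :: r).idxOf '.' = r.idxOf '.' + 1 := by simp [List.idxOf_cons, hbe]
            rw [if_pos hm, hidx]
            split_ifs <;>
              first
                | rfl
                | simp [pvCountSegs, pvCountSeg, hd, List.take_succ_cons]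
          · rw [if_neg hm]; simp [pvCountSegs, pvCountSeg, hd]

-- ===== VERDICT (by name: the statement is the Claim_ definition above) =====
theorem getNumberOfDigitsDecimal_spec : Claim_equal_getNumberOfDigitsDecimal := by
  intro cad _
  show getNumberOfDigitsDecimal cad = getNumberOfDigitsDecimal_alt cad
  rw [getNumberOfDigitsDecimal, getNumberOfDigitsDecimal_alt, pvLoopA_eq_pvAlt]
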